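-- pv_equiv track=rewrite | github.com/rodvalentee/doninha | doninha.py | retorna_melhor_frase
-- ===== SOURCE A (Python) =====
-- CONST_FRASE = "METHINKS IT IS LIKE A WEASEL"
--
-- CONST_TAM_FRASE = 28
--
-- def retorna_melhor_frase(lista_auxiliar):  # Retorna a frase que tem mais caracteres iguais
--     lista_pontos = []
--     for i in lista_auxiliar:
--         pontuacao = 0
--         for j in range(0, CONST_TAM_FRASE):
--             if i[j] == CONST_FRASE[j]:
--                 pontuacao = pontuacao + 1
--         lista_pontos.append(pontuacao)
--     posicao_melhor = lista_pontos.index(max(lista_pontos))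
--     melhor_frase = lista_auxiliar[posicao_melhor]
--     return melhor_frase
-- ===== SOURCE B (Python) =====
-- CONST_FRASE = "METHINKS IT IS LIKE A WEASEL"
--
-- CONST_TAM_FRASE = 28
--
-- def retorna_melhor_frase(lista_auxiliar):
--     # Counting-sort selection: scores are bounded by 0..28, so bucket the phrases
--     # by score (keeping the FIRST phrase of each score by walking the list in
--     # reverse, so earlier phrases overwrite later ones) and return the occupied
--     # bucket with the highest score.  No score list, no max(), no .index().
--     buckets = [None] * (CONST_TAM_FRASE + 1)
--     for frase in reversed(lista_auxiliar):
--         pontos = sum(frase[j] == CONST_FRASE[j] for j in range(CONST_TAM_FRASE))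
--         buckets[pontos] = frase
--     for pontos in range(CONST_TAM_FRASE, -1, -1):
--         if buckets[pontos] is not None:
--             return buckets[pontos]
-- ===== Notes on version B (the rewrite author's own statement) =====
-- stated objective: alternative
-- what changed: Replaced the score-list + .index(max(...)) + subscript argmax by a counting-sort selection: scores are bounded by 0..28, so B buckets phrases by score (reverse traversal keeps the first phrase per score) and returns the occupied bucket with the highest score; no score list, no max(), no .index().
-- outside the precondition, e.g. on retorna_melhor_frase([]): A raises ValueError, B returns None
import Mathlib
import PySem

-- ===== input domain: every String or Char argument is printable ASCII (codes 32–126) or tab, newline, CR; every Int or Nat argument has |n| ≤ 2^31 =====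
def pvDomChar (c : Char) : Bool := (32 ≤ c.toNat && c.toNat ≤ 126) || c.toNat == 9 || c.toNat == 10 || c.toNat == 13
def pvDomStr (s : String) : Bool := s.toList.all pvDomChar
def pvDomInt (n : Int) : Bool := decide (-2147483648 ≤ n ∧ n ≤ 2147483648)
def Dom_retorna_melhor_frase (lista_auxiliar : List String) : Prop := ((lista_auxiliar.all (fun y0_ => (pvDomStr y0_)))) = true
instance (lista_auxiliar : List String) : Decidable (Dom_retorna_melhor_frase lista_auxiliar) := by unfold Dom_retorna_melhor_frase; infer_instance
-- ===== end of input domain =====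

-- B replaces A's score-list + .index(max(...)) + subscript argmax by a counting-sort
-- selection over 29 score buckets (scores are bounded by 0..28), filled in reverse so
-- the first phrase of each score survives; same cost, different algorithm.
-- (equivalence on Pre_: nonempty lists of phrases with at least 28 characters)

def pvCONST_FRASE : String := "METHINKS IT IS LIKE A WEASEL"
def pvCONST_TAM_FRASE : Int := 28

-- ===== PORT A =====
-- inner loop: 'pontuacao = 0; for j in range(0, 28): if i[j] == CONST_FRASE[j]: pontuacao += 1'
-- (inside Pre_ both pyGet? are 'some'; on shorter strings Python raises IndexError — excluded by Pre_)
def pvPontuacaoA (i : String) : Int :=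
  (PySem.List.pyRange 0 pvCONST_TAM_FRASE 1).foldl
    (fun pontuacao j =>
      if PySem.Str.pyGet? i j == PySem.Str.pyGet? pvCONST_FRASE j then pontuacao + 1 else pontuacao) 0

def retorna_melhor_frase (lista_auxiliar : List String) : String :=
  let lista_pontos := lista_auxiliar.foldl (fun acc i => acc ++ [pvPontuacaoA i]) []
  -- max(lista_pontos): raises ValueError on [] (excluded by Pre_), hence getD
  let posicao_melhor := (PySem.List.index? lista_pontos
      ((PySem.List.max? lista_pontos (fun y => y)).getD 0)).getD 0
  (PySem.List.pyGet? lista_auxiliar (posicao_melhor : Int)).getD ""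

-- ===== PORT B =====
-- 'pontos = sum(frase[j] == CONST_FRASE[j] for j in range(CONST_TAM_FRASE))'
-- (inside Pre_ both pyGet? are 'some'; on shorter strings Python raises IndexError — excluded by Pre_)
def pvPontosB (frase : String) : Int :=
  ((PySem.List.pyRange 0 pvCONST_TAM_FRASE 1).map
    (fun j => if PySem.Str.pyGet? frase j == PySem.Str.pyGet? pvCONST_FRASE j then (1 : Int) else 0)).sum

-- 'buckets = [None]*(28+1); for frase in reversed(lista): buckets[sum(...)] = frase'
def pvBuckets (lista_auxiliar : List String) : List (Option String) :=
  lista_auxiliar.reverse.foldl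
    (fun buckets frase => PySem.List.pySetD buckets (pvPontosB frase) (some frase))
    (List.replicate (pvCONST_TAM_FRASE.toNat + 1) none)

-- 'for pontos in range(28, -1, -1): if buckets[pontos] is not None: return buckets[pontos]'
-- (the findSome? is that early-return scan; falling off the loop Python returns None — only
--  reachable for the empty list, which Pre_ excludes — rendered as "")
def retorna_melhor_frase_alt (lista_auxiliar : List String) : String :=
  match (PySem.List.pyRange pvCONST_TAM_FRASE (-1) (-1)).findSome?
      (fun pontos => PySem.List.pyGetD (pvBuckets lista_auxiliar) pontos none) with
  | some f => f
  | none => ""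

-- ===== PRECONDITION & SPEC =====
-- Pre_ excludes exactly the inputs where Python A raises: the empty list (max([]) is a
-- ValueError) and lists containing a phrase of fewer than 28 characters (i[j] IndexError).
def Pre_retorna_melhor_frase (lista_auxiliar : List String) : Prop :=
  lista_auxiliar ≠ [] ∧ ∀ s ∈ lista_auxiliar, 28 ≤ s.toList.length
instance (lista_auxiliar : List String) : Decidable (Pre_retorna_melhor_frase lista_auxiliar) := by
  unfold Pre_retorna_melhor_frase; infer_instance

def pvWitness_retorna_melhor_frase : List String :=
  ["METHINKS IT IS LIKE A WEASEL", "ABCDEFGHIJKLMNOPQRSTUVWXYZAB"]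

def Spec_retorna_melhor_frase (lista_auxiliar : List String) (out : String) : Prop := out = retorna_melhor_frase_alt lista_auxiliar
instance (lista_auxiliar : List String) (out : String) : Decidable (Spec_retorna_melhor_frase lista_auxiliar out) := by unfold Spec_retorna_melhor_frase; infer_instance

-- ===== CLAIM (what is proved, stated in full; the proofs are below) =====
def Claim_equal_retorna_melhor_frase : Prop := ∀ (lista_auxiliar : List String), Dom_retorna_melhor_frase lista_auxiliar → Pre_retorna_melhor_frase lista_auxiliar → Spec_retorna_melhor_frase lista_auxiliar (retorna_melhor_frase lista_auxiliar)

-- ===== LEMMAS AND PROOFS =====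

-- B's score is a 0/1-sum, i.e. a count over the index range
theorem pv_pontosB_countP (f : String) :
    pvPontosB f = ((PySem.List.pyRange 0 pvCONST_TAM_FRASE 1).countP
      (fun j => PySem.Str.pyGet? f j == PySem.Str.pyGet? pvCONST_FRASE j) : Int) := by
  unfold pvPontosB
  rw [PySem.List.sum_map_ite_one_zero]

theorem pv_pontosB_nonneg (f : String) : 0 ≤ pvPontosB f := by
  rw [pv_pontosB_countP]; positivity

theorem pv_pontosB_le (f : String) : pvPontosB f ≤ 28 := by
  rw [pv_pontosB_countP]
  have h1 : (PySem.List.pyRange 0 pvCONST_TAM_FRASE 1).countP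
        (fun j => PySem.Str.pyGet? f j == PySem.Str.pyGet? pvCONST_FRASE j)
      ≤ (PySem.List.pyRange 0 pvCONST_TAM_FRASE 1).length := List.countP_le_length
  have h2 : (PySem.List.pyRange 0 pvCONST_TAM_FRASE 1).length = 28 := by decide
  rw [h2] at h1
  exact_mod_cast h1

-- A's counting loop and B's 0/1-sum compute the same score
theorem pv_scoreAB (f : String) : pvPontuacaoA f = pvPontosB f := by
  unfold pvPontuacaoA
  rw [PySem.List.foldl_if_add_one, pv_pontosB_countP, zero_add]

-- filling the buckets front-to-back: the head phrase writes last, so it overwrites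
theorem pv_buckets_cons (x : String) (t : List String) :
    pvBuckets (x :: t) = (pvBuckets t).set (pvPontosB x).toNat (some x) := by
  unfold pvBuckets
  rw [List.reverse_cons, List.foldl_append]
  simp only [List.foldl_cons, List.foldl_nil]
  rw [PySem.List.pySetD_of_nonneg _ _ (pv_pontosB_nonneg x)]

theorem pv_buckets_length (l : List String) : (pvBuckets l).length = 29 := by
  induction l with
  | nil => simp [pvBuckets, pvCONST_TAM_FRASE]
  | cons x t ih => rw [pv_buckets_cons]; simpa using ih

-- bucket s holds the FIRST phrase whose score is s (none if there is no such phrase)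
theorem pv_buckets_get (l : List String) (s : Nat) (hs : s < 29) :
    (pvBuckets l)[s]'(by rw [pv_buckets_length]; exact hs)
      = l.find? (fun f => pvPontosB f == (s : Int)) := by
  induction l with
  | nil =>
    rw [List.find?_nil]
    have h : pvBuckets [] = List.replicate 29 none := rfl
    simp only [h, List.getElem_replicate]
  | cons x t ih =>
    have hx28 : (pvPontosB x).toNat < 29 := by
      have h1 := pv_pontosB_nonneg x
      have h2 := pv_pontosB_le x
      omega
    rw [List.find?_cons]
    by_cases hxs : pvPontosB x = (s : Int)
    · have hset : (pvPontosB x).toNat = s := by omega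
      simp only [hxs, beq_self_eq_true]
      simp [pv_buckets_cons, hset]
    · have hset : (pvPontosB x).toNat ≠ s := by
        have h1 := pv_pontosB_nonneg x
        omega
      have hb : (pvPontosB x == (s : Int)) = false := by simpa using hxs
      rw [hb]
      simp only [pv_buckets_cons]
      rw [List.getElem_set_ne (by omega)]
      exact ih

-- the countdown range of B's selection loop
def pvDown (k : Nat) : List Int := (List.range k).reverse.map (fun n => (n : Int))

theorem pv_down_succ (k : Nat) : pvDown (k + 1) = (k : Int) :: pvDown k := by
  simp [pvDown, List.range_succ]

-- scanning the buckets from the top: the first occupied bucket is the first phrase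
-- achieving the (attained) upper bound M
theorem pv_scan (l : List String) (M : Int) (h0 : 0 ≤ M)
    (hub : ∀ f ∈ l, pvPontosB f ≤ M)
    (hatt : ∃ g ∈ l, pvPontosB g = M) :
    ∀ (k : Nat), k ≤ 29 → M < (k : Int) →
      (pvDown k).findSome? (fun pontos => PySem.List.pyGetD (pvBuckets l) pontos none)
        = l.find? (fun f => pvPontosB f == M) := by
  intro k
  induction k with
  | zero => intro _ hM; exfalso; omega
  | succ k ih =>
    intro hk29 hMk
    rw [pv_down_succ, List.findSome?_cons]
    have hk' : k < 29 := by omega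
    have hget : PySem.List.pyGetD (pvBuckets l) (k : Int) none
        = (pvBuckets l)[k]'(by rw [pv_buckets_length]; exact hk') := by
      rw [PySem.List.pyGetD_natCast]
      exact List.getD_eq_getElem _ _ _
    rw [hget, pv_buckets_get l k hk']
    by_cases hMeq : M = (k : Int)
    · -- this bucket is the maximum score: it is occupied by the first best phrase
      obtain ⟨g, hg, hgs⟩ := hatt
      have : (l.find? (fun f => pvPontosB f == (k : Int))).isSome := by
        rw [List.find?_isSome]
        exact ⟨g, hg, by simp [hgs, ← hMeq]⟩
      obtain ⟨f, hf⟩ := Option.isSome_iff_exists.mp this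
      rw [hMeq, hf]
    · -- every score is below this bucket: it is empty, keep scanning
      have hlt : M < (k : Int) := lt_of_le_of_ne (by omega) hMeq
      have hnone : l.find? (fun f => pvPontosB f == (k : Int)) = none := by
        rw [List.find?_eq_none]
        intro f hfl
        have := hub f hfl
        simp only [beq_iff_eq]
        omega
      rw [hnone]
      exact ih (by omega) hlt

-- the first element whose score equals m is at position index?(scores, m)
theorem pv_index_find (l : List String) (m : Int) (f : String)
    (h : l.find? (fun g => pvPontosB g == m) = some f) :
    PySem.List.pyGet? l (((PySem.List.index? (l.map pvPontosB) m).getD 0 : Nat) : Int)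
      = some f := by
  induction l with
  | nil => simp at h
  | cons a t ih =>
    by_cases ha : pvPontosB a = m
    · have hp : (fun g => pvPontosB g == m) a = true := by simp [ha]
      rw [List.find?_cons_of_pos (p := fun g => pvPontosB g == m) (a := a) (l := t) hp] at h
      have hf : f = a := (Option.some_inj.mp h).symm
      subst hf
      have hmap : (f :: t).map pvPontosB = m :: t.map pvPontosB := by simp [ha]
      rw [hmap, PySem.List.index?_cons_self]
      simp
    · have hp : ¬ (fun g => pvPontosB g == m) a = true := by simp [ha]
      rw [List.find?_cons_of_neg (p := fun g => pvPontosB g == m) (a := a) (l := t) hp] at h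
      have hmem : m ∈ t.map pvPontosB := by
        have hfm : pvPontosB f = m := by simpa using List.find?_some h
        exact hfm ▸ List.mem_map_of_mem (List.mem_of_find?_eq_some h)
      obtain ⟨k, hk⟩ := Option.isSome_iff_exists.mp ((PySem.List.index?_isSome_iff _ _).mpr hmem)
      have hidx : PySem.List.index? ((a :: t).map pvPontosB) m = some (k + 1) := by
        rw [List.map_cons, PySem.List.index?_cons_of_ne _ ha, hk]
        rfl
      rw [hidx]
      have ihk := ih h
      rw [hk] at ihk
      have hcast : ((k + 1 : Nat) : Int) = (k : Int) + 1 := by push_cast; ring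
      rw [Option.getD_some, hcast, PySem.List.pyGet?_cons_succ]
      simpa using ihk

-- ===== VERDICT (by name: the statement is the Claim_ definition above) =====
theorem retorna_melhor_frase_spec : Claim_equal_retorna_melhor_frase := by
  intro l _ hpre
  unfold Spec_retorna_melhor_frase
  obtain ⟨hne, _⟩ := hpre
  obtain ⟨x, xs, rfl⟩ := List.exists_cons_of_ne_nil hne
  unfold retorna_melhor_frase retorna_melhor_frase_alt
  simp only [PySem.List.foldl_append_singleton_eq_map, List.nil_append]
  have hmapAB : (x :: xs).map pvPontuacaoA = (x :: xs).map pvPontosB :=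
    List.map_congr_left (fun s _ => pv_scoreAB s)
  rw [hmapAB]
  -- the maximum score M, attained and an upper bound
  rw [show (x :: xs).map pvPontosB = pvPontosB x :: xs.map pvPontosB from List.map_cons ..]
  rw [PySem.List.max?_id_cons]
  set M := (xs.map pvPontosB).foldl max (pvPontosB x) with hM
  have hMsome : PySem.List.max? (pvPontosB x :: xs.map pvPontosB) (fun y => y) = some M := by
    rw [PySem.List.max?_id_cons]
  have hMmem : M ∈ pvPontosB x :: xs.map pvPontosB := PySem.List.max?_mem hMsome
  have hMub : ∀ f ∈ x :: xs, pvPontosB f ≤ M := by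
    intro f hf
    have := PySem.List.max?_isMax hMsome (pvPontosB f) (by
      rw [← List.map_cons]; exact List.mem_map_of_mem hf)
    simpa using this
  have hatt : ∃ g ∈ x :: xs, pvPontosB g = M := by
    rw [← List.map_cons] at hMmem
    obtain ⟨g, hg, hgs⟩ := List.mem_map.mp hMmem
    exact ⟨g, hg, hgs⟩
  have hM0 : 0 ≤ M := by
    obtain ⟨g, _, hgs⟩ := hatt
    exact hgs ▸ pv_pontosB_nonneg g
  have hM28 : M ≤ 28 := by
    obtain ⟨g, _, hgs⟩ := hatt
    exact hgs ▸ pv_pontosB_le g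
  -- the first phrase attaining M
  have hfind : ((x :: xs).find? (fun f => pvPontosB f == M)).isSome := by
    rw [List.find?_isSome]
    obtain ⟨g, hg, hgs⟩ := hatt
    exact ⟨g, hg, by simp [hgs]⟩
  obtain ⟨f, hf⟩ := Option.isSome_iff_exists.mp hfind
  -- B returns it
  have hrange : PySem.List.pyRange pvCONST_TAM_FRASE (-1) (-1) = pvDown 29 := by decide
  rw [hrange, pv_scan (x :: xs) M hM0 hMub hatt 29 (le_refl _) (by omega), hf]
  -- A returns it
  rw [Option.getD_some, ← List.map_cons]
  rw [pv_index_find (x :: xs) M f hf]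
  simp
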